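-- pv_equiv track=rewrite | github.com/dsaban/warl0k_dash_app_ai_server | app/WARLOK_PIM_HUB_AI/model.py | infer_attack_labels
-- ===== SOURCE A (Python) =====
-- from typing import Dict, List, Tuple, Optional, Any
--
-- ATK_LABELS = ["none", "reorder", "drop", "replay", "timewarp", "splice"]
--
-- FIELD_TO_ATKS: Dict[str, List[str]] = {
--     "dt_ms":          ["timewarp"],
--     "op_code":        ["splice"],
--     "step_idx":       ["reorder"],
--     "global_counter": ["replay"],
--     "window_id":      ["reorder"],
--     "os_meas":        ["splice"],
--     "session_id":     ["replay"],
-- }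
--
-- def infer_attack_labels(edits: List[Dict], named_attacks: List[str]) -> List[int]:
--     active = set()
--     for a in named_attacks:
--         if a != "none":
--             active.add(a)
--     for e in edits:
--         for lbl in FIELD_TO_ATKS.get(str(e.get("field", "")), []):
--             active.add(lbl)
--     if not active:
--         active.add("none")
--     return sorted([ATK_LABELS.index(a) for a in active if a in ATK_LABELS])
-- ===== SOURCE B (Python) =====
-- from typing import Dict, List
--
-- ATK_LABELS = ["none", "reorder", "drop", "replay", "timewarp", "splice"]
--
-- FIELD_TO_ATKS: Dict[str, List[str]] = {
--     "dt_ms":          ["timewarp"],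
--     "op_code":        ["splice"],
--     "step_idx":       ["reorder"],
--     "global_counter": ["replay"],
--     "window_id":      ["reorder"],
--     "os_meas":        ["splice"],
--     "session_id":     ["replay"],
-- }
--
-- def infer_attack_labels(edits: List[Dict], named_attacks: List[str]) -> List[int]:
--     # Label-major instead of input-major: no accumulating set/array at all.
--     # For each label of the ordered universe, a membership query over the raw
--     # inputs decides whether it is triggered; the output is therefore ascending
--     # by construction.  The 'none' default fires only when nothing at all was
--     # recorded (an unknown attack name still suppresses it, as in A).
--     def hit(lbl: str) -> bool:
--         return lbl in named_attacks or any(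
--             lbl in FIELD_TO_ATKS.get(str(e.get("field", "")), []) for e in edits)
--     out = [i for i, lbl in enumerate(ATK_LABELS) if lbl != "none" and hit(lbl)]
--     if out or any(a != "none" for a in named_attacks):
--         return out
--     return [0]
-- ===== Notes on version B (the rewrite author's own statement) =====
-- stated objective: simpler
-- what changed: Inverts the traversal: instead of accumulating a set of triggered labels over the inputs and then index-sorting it, B has no accumulator at all -- it walks the fixed ordered label universe once and decides each label by a membership query over the raw inputs, so the result is ascending by construction and sorted()/.index disappear.
import Mathlib
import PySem

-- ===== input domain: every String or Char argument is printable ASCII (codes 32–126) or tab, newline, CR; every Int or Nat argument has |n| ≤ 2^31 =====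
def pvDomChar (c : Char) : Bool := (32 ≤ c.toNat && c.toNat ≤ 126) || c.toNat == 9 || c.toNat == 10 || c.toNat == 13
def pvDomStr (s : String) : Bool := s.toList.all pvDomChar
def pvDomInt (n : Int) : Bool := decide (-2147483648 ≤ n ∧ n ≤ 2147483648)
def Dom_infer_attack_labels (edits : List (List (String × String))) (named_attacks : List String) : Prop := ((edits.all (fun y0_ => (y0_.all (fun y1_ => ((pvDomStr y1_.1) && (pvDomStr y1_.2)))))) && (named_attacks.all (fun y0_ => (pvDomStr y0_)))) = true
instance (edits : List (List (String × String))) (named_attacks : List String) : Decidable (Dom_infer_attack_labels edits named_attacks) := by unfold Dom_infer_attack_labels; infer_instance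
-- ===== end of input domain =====

-- B inverts the traversal: no accumulating set at all — it walks the ordered label
-- universe and decides each label by a membership query over the raw inputs, so the
-- output is ascending by construction (objective: simpler).

-- ===== PORT A =====
def pvAtkLabels : List String := ["none", "reorder", "drop", "replay", "timewarp", "splice"]

def pvFieldToAtks : PySem.Dict String (List String) := PySem.Dict.ofList
  [("dt_ms", ["timewarp"]), ("op_code", ["splice"]), ("step_idx", ["reorder"]),
   ("global_counter", ["replay"]), ("window_id", ["reorder"]), ("os_meas", ["splice"]),
   ("session_id", ["replay"])]

-- literal port of A: build the set 'active', default to {"none"}, then sorted([index(a) …]).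
-- ATK_LABELS.index(a) is guarded by 'a in ATK_LABELS', so the .getD 0 default is never used.
def infer_attack_labels (edits : List (List (String × String))) (named_attacks : List String) : List Int :=
  let active : PySem.Set String :=
    named_attacks.foldl (fun s a => if a ≠ "none" then PySem.Set.add s a else s) PySem.Set.empty
  let active :=
    edits.foldl (fun s e =>
      (PySem.Dict.getD pvFieldToAtks (PySem.Dict.getD (PySem.Dict.mk e) "field" "") []).foldl
        (fun s lbl => PySem.Set.add s lbl) s) active
  let active := if active = [] then PySem.Set.add active "none" else active
  PySem.List.sorted
    ((active.filter (fun a => decide (a ∈ pvAtkLabels))).map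
      (fun a => Int.ofNat ((PySem.List.index? pvAtkLabels a).getD 0)))
    (fun x => x)

-- ===== PORT B =====
-- literal port of B: per-label membership query 'hit' over the raw inputs, output read
-- off enumerate(ATK_LABELS) in order, 'none' default only when nothing was recorded.
def infer_attack_labels_alt (edits : List (List (String × String))) (named_attacks : List String) : List Int :=
  let hit : String → Bool := fun lbl =>
    named_attacks.contains lbl ||
      edits.any (fun e =>
        (PySem.Dict.getD pvFieldToAtks (PySem.Dict.getD (PySem.Dict.mk e) "field" "") []).contains lbl)
  let out := ((PySem.List.enumerate pvAtkLabels).filter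
      (fun p => p.2 != "none" && hit p.2)).map (fun p => p.1)
  if !out.isEmpty || named_attacks.any (fun a => a != "none") then out else [0]

-- ===== PRECONDITION & SPEC =====
def Spec_infer_attack_labels (edits : List (List (String × String))) (named_attacks : List String) (out : List Int) : Prop := out = infer_attack_labels_alt edits named_attacks
instance (edits : List (List (String × String))) (named_attacks : List String) (out : List Int) : Decidable (Spec_infer_attack_labels edits named_attacks out) := by unfold Spec_infer_attack_labels; infer_instance

-- ===== CLAIM (what is proved, stated in full; the proofs are below) =====
def Claim_equal_infer_attack_labels : Prop := ∀ (edits : List (List (String × String))) (named_attacks : List String), Dom_infer_attack_labels edits named_attacks → Spec_infer_attack_labels edits named_attacks (infer_attack_labels edits named_attacks)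

-- ===== LEMMAS AND PROOFS =====

def pvLbl (i : Nat) : String := pvAtkLabels.getD i ""

def pvVals (e : List (String × String)) : List String :=
  PySem.Dict.getD pvFieldToAtks (PySem.Dict.getD (PySem.Dict.mk e) "field" "") []

-- membership in A's set after the named_attacks loop
theorem pv_mem_named (na : List String) (s : List String) (a : String) :
    a ∈ na.foldl (fun s a => if a ≠ "none" then PySem.Set.add s a else s) s
    ↔ a ∈ s ∨ (a ∈ na ∧ a ≠ "none") := by
  induction na generalizing s with
  | nil => simp
  | cons x xs ih =>
    simp only [List.foldl_cons]
    rw [ih]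
    by_cases hx : x = "none"
    · subst hx
      simp only [ne_eq, not_true_eq_false, if_false, List.mem_cons]
      constructor
      · rintro (h | ⟨h1, h2⟩)
        · exact Or.inl h
        · exact Or.inr ⟨Or.inr h1, h2⟩
      · rintro (h | ⟨h1 | h1, h2⟩)
        · exact Or.inl h
        · exact absurd h1 h2
        · exact Or.inr ⟨h1, h2⟩
    · rw [if_pos hx]
      rw [show (a ∈ PySem.Set.add s x) ↔ (a ∈ s ∨ a = x) from PySem.Set.mem_add s x a]
      constructor
      · rintro ((h | h) | ⟨h1, h2⟩)
        · exact Or.inl h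
        · exact Or.inr ⟨h ▸ List.mem_cons_self, h ▸ hx⟩
        · exact Or.inr ⟨List.mem_cons_of_mem _ h1, h2⟩
      · rintro (h | ⟨h1, h2⟩)
        · exact Or.inl (Or.inl h)
        · rcases List.mem_cons.mp h1 with h1 | h1
          · exact Or.inl (Or.inr h1)
          · exact Or.inr ⟨h1, h2⟩

-- membership in the inner label fold
theorem pv_mem_inner (ws : List String) (s : List String) (a : String) :
    a ∈ ws.foldl (fun s lbl => PySem.Set.add s lbl) s ↔ a ∈ s ∨ a ∈ ws := by
  induction ws generalizing s with
  | nil => simp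
  | cons w ws ih =>
    simp only [List.foldl_cons]
    rw [ih, show (a ∈ PySem.Set.add s w) ↔ (a ∈ s ∨ a = w) from PySem.Set.mem_add s w a]
    simp [List.mem_cons]
    tauto

-- membership in A's set after the edits loop
theorem pv_mem_edits (es : List (List (String × String))) (s : List String) (a : String) :
    a ∈ es.foldl (fun s e => (pvVals e).foldl (fun s lbl => PySem.Set.add s lbl) s) s
    ↔ a ∈ s ∨ ∃ e ∈ es, a ∈ pvVals e := by
  induction es generalizing s with
  | nil => simp
  | cons e es ih =>
    simp only [List.foldl_cons]
    rw [ih, pv_mem_inner]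
    simp only [List.mem_cons]
    constructor
    · rintro ((h | h) | ⟨f, hf, hm⟩)
      · exact Or.inl h
      · exact Or.inr ⟨e, Or.inl rfl, h⟩
      · exact Or.inr ⟨f, Or.inr hf, hm⟩
    · rintro (h | ⟨f, (hf | hf), hm⟩)
      · exact Or.inl (Or.inl h)
      · exact Or.inl (Or.inr (hf ▸ hm))
      · exact Or.inr ⟨f, hf, hm⟩

theorem pv_nodup_named (na : List String) (s : List String) (h : s.Nodup) :
    (na.foldl (fun s a => if a ≠ "none" then PySem.Set.add s a else s) s).Nodup := by
  induction na generalizing s with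
  | nil => simpa using h
  | cons x xs ih =>
    simp only [List.foldl_cons]
    split_ifs with hx
    · exact ih _ (PySem.Set.nodup_add s x h)
    · exact ih _ h

theorem pv_nodup_inner (ws : List String) (s : List String) (h : s.Nodup) :
    (ws.foldl (fun s lbl => PySem.Set.add s lbl) s).Nodup := by
  induction ws generalizing s with
  | nil => simpa using h
  | cons w ws ih => exact ih _ (PySem.Set.nodup_add s w h)

theorem pv_nodup_edits (es : List (List (String × String))) (s : List String) (h : s.Nodup) :
    (es.foldl (fun s e => (pvVals e).foldl (fun s lbl => PySem.Set.add s lbl) s) s).Nodup := by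
  induction es generalizing s with
  | nil => simpa using h
  | cons e es ih => exact ih _ (pv_nodup_inner _ _ h)

-- every FIELD_TO_ATKS value is a real (non-"none") attack label
theorem pv_vals_mem (f : String) : ∀ w ∈ PySem.Dict.getD pvFieldToAtks f [],
    w ∈ pvAtkLabels ∧ w ≠ "none" := by
  by_cases hc : PySem.Dict.contains pvFieldToAtks f = true
  · have : f ∈ PySem.Dict.keys pvFieldToAtks := (PySem.Dict.contains_iff_mem_keys pvFieldToAtks f).mp hc
    have hkeys : PySem.Dict.keys pvFieldToAtks =
      ["dt_ms", "op_code", "step_idx", "global_counter", "window_id", "os_meas", "session_id"] := by decide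
    rw [hkeys] at this
    fin_cases this <;> decide
  · rw [PySem.Dict.getD_of_not_contains pvFieldToAtks [] (by simpa using hc)]; simp

-- A's sorted-index list equals the ascending scan of the label universe
theorem pv_sortA (s : List String) (hnd : s.Nodup) :
    PySem.List.sorted
      ((s.filter (fun a => decide (a ∈ pvAtkLabels))).map
        (fun a => Int.ofNat ((PySem.List.index? pvAtkLabels a).getD 0)))
      (fun x => x)
    = ((List.range 6).filter (fun i => decide (pvLbl i ∈ s))).map (fun i => Int.ofNat i) := by
  apply PySem.List.sorted_eq_of_perm_of_pairwise_lt
  · have hmemfacts : ∀ a ∈ pvAtkLabels,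
        (((PySem.List.index? pvAtkLabels a).getD 0 : Nat) < 6 ∧
          pvLbl ((PySem.List.index? pvAtkLabels a).getD 0) = a) := by decide
    have hlblfacts : ∀ i < 6, pvLbl i ∈ pvAtkLabels ∧
        ((PySem.List.index? pvAtkLabels (pvLbl i)).getD 0 : Nat) = i := by decide
    have h1 : (((List.range 6).filter (fun i => decide (pvLbl i ∈ s))).map (fun i => Int.ofNat i)).Nodup :=
      ((List.nodup_range).filter _).map (fun a b hab => Int.ofNat.inj hab)
    have h2 : ((s.filter (fun a => decide (a ∈ pvAtkLabels))).map
        (fun a => Int.ofNat ((PySem.List.index? pvAtkLabels a).getD 0))).Nodup := by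
      refine (List.Nodup.filter _ hnd).map_on ?_
      intro a ha b hb he
      have ha' : a ∈ pvAtkLabels := by simpa using (List.mem_filter.mp ha).2
      have hb' : b ∈ pvAtkLabels := by simpa using (List.mem_filter.mp hb).2
      have : ((PySem.List.index? pvAtkLabels a).getD 0 : Nat)
           = ((PySem.List.index? pvAtkLabels b).getD 0 : Nat) := Int.ofNat.inj he
      calc a = pvLbl ((PySem.List.index? pvAtkLabels a).getD 0) := (hmemfacts a ha').2.symm
        _ = pvLbl ((PySem.List.index? pvAtkLabels b).getD 0) := by rw [this]
        _ = b := (hmemfacts b hb').2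
    rw [List.perm_ext_iff_of_nodup h1 h2]
    intro k
    simp only [List.mem_map, List.mem_filter, List.mem_range, decide_eq_true_eq]
    constructor
    · rintro ⟨i, ⟨hi6, hmem⟩, rfl⟩
      exact ⟨pvLbl i, ⟨hmem, by simp [(hlblfacts i hi6).1]⟩, by rw [(hlblfacts i hi6).2]⟩
    · rintro ⟨a, ⟨hmem, ha⟩, rfl⟩
      have ha' : a ∈ pvAtkLabels := by simpa using ha
      exact ⟨_, ⟨(hmemfacts a ha').1, by rw [(hmemfacts a ha').2]; exact hmem⟩, rfl⟩
  · refine List.Pairwise.map _ (fun a b h => ?_) (List.Pairwise.filter _ (List.pairwise_lt_range))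
    exact Int.ofNat_lt.mpr h

-- B's enumerate read-off equals the same scan of range 6, for any predicate h
theorem pv_enum_eq (h : String → Bool) :
    ((PySem.List.enumerate pvAtkLabels).filter (fun p => p.2 != "none" && h p.2)).map (fun p => p.1)
    = ((List.range 6).filter (fun i => decide (i ≠ 0) && h (pvLbl i))).map (fun i => Int.ofNat i) := by
  have e1 : PySem.List.enumerate pvAtkLabels =
      [((0 : Int), "none"), (1, "reorder"), (2, "drop"), (3, "replay"), (4, "timewarp"), (5, "splice")] := by decide
  have e2 : List.range 6 = [0, 1, 2, 3, 4, 5] := by decide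
  rw [e1, e2]
  simp only [List.filter_cons, List.filter_nil, pvLbl, pvAtkLabels]
  norm_num
  cases h "reorder" <;> cases h "drop" <;> cases h "replay" <;> cases h "timewarp" <;>
    cases h "splice" <;> simp

-- A's "active" set after both loops, and B's per-label query and read-off (proof-side names)
def pvAct (edits : List (List (String × String))) (named_attacks : List String) : List String :=
  edits.foldl (fun s e => (pvVals e).foldl (fun s lbl => PySem.Set.add s lbl) s)
    (named_attacks.foldl (fun s a => if a ≠ "none" then PySem.Set.add s a else s) PySem.Set.empty)

def pvHit (edits : List (List (String × String))) (named_attacks : List String) (lbl : String) : Bool :=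
  named_attacks.contains lbl || edits.any (fun e => (pvVals e).contains lbl)

def pvOut (edits : List (List (String × String))) (named_attacks : List String) : List Int :=
  ((PySem.List.enumerate pvAtkLabels).filter
      (fun p => p.2 != "none" && pvHit edits named_attacks p.2)).map (fun p => p.1)

theorem pv_mem_act (edits : List (List (String × String))) (na : List String) (a : String) :
    a ∈ pvAct edits na ↔ (a ∈ na ∧ a ≠ "none") ∨ ∃ e ∈ edits, a ∈ pvVals e := by
  unfold pvAct
  rw [pv_mem_edits, pv_mem_named]
  simp [PySem.Set.empty]

theorem pv_hit_iff (edits : List (List (String × String))) (na : List String) (lbl : String) :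
    pvHit edits na lbl = true ↔ lbl ∈ na ∨ ∃ e ∈ edits, lbl ∈ pvVals e := by
  simp [pvHit]

theorem pv_none_not_act (edits : List (List (String × String))) (na : List String) :
    "none" ∉ pvAct edits na := by
  rw [pv_mem_act]
  rintro (⟨_, h⟩ | ⟨e, _, hm⟩)
  · exact h rfl
  · exact (pv_vals_mem _ "none" hm).2 rfl

theorem pv_lbl_of_mem (a : String) (ha : a ∈ pvAtkLabels) (hne : a ≠ "none") :
    ∃ i, i < 6 ∧ i ≠ 0 ∧ pvLbl i = a := by
  fin_cases ha
  · exact absurd rfl hne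
  · exact ⟨1, by decide, by decide, rfl⟩
  · exact ⟨2, by decide, by decide, rfl⟩
  · exact ⟨3, by decide, by decide, rfl⟩
  · exact ⟨4, by decide, by decide, rfl⟩
  · exact ⟨5, by decide, by decide, rfl⟩

theorem pv_main (edits : List (List (String × String))) (na : List String) :
    infer_attack_labels edits na = infer_attack_labels_alt edits na := by
  have hA : infer_attack_labels edits na =
      PySem.List.sorted
        (((if pvAct edits na = [] then PySem.Set.add (pvAct edits na) "none" else pvAct edits na).filter
            (fun a => decide (a ∈ pvAtkLabels))).map
          (fun a => Int.ofNat ((PySem.List.index? pvAtkLabels a).getD 0)))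
        (fun x => x) := rfl
  have hB : infer_attack_labels_alt edits na =
      (if !(pvOut edits na).isEmpty || na.any (fun a => a != "none") then pvOut edits na else [0]) := rfl
  rw [hA, hB]
  by_cases h0 : pvAct edits na = []
  · -- nothing was recorded: A returns ["none"]'s index, B takes the [0] branch
    rw [if_pos h0, h0]
    have hout : pvOut edits na = [] := by
      unfold pvOut
      rw [List.map_eq_nil_iff, List.filter_eq_nil_iff]
      intro p hp hcond
      simp only [Bool.and_eq_true, bne_iff_ne, ne_eq] at hcond
      obtain ⟨hne, hhit⟩ := hcond
      have hmem : p.2 ∈ pvAct edits na := by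
        rw [pv_mem_act]
        rcases (pv_hit_iff edits na p.2).mp hhit with h | h
        · exact Or.inl ⟨h, hne⟩
        · exact Or.inr h
      rw [h0] at hmem
      exact List.not_mem_nil hmem
    have hany : na.any (fun a => a != "none") = false := by
      rw [Bool.eq_false_iff]
      intro h
      obtain ⟨a, ha, hne⟩ := List.any_eq_true.mp h
      have : a ∈ pvAct edits na := (pv_mem_act edits na a).mpr (Or.inl ⟨ha, by simpa using hne⟩)
      rw [h0] at this
      exact List.not_mem_nil this
    rw [hout, hany]
    decide
  · -- something was recorded: both return the ascending triggered indices
    rw [if_neg h0]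
    have hnd : (pvAct edits na).Nodup :=
      pv_nodup_edits _ _ (pv_nodup_named _ _ List.nodup_nil)
    have hcongr : ∀ i ∈ List.range 6,
        (decide (i ≠ 0) && pvHit edits na (pvLbl i)) = decide (pvLbl i ∈ pvAct edits na) := by
      intro i hi
      have hi6 : i < 6 := List.mem_range.mp hi
      by_cases hz : i = 0
      · subst hz
        have : pvLbl 0 = "none" := rfl
        simp [this, pv_none_not_act edits na]
      · have hne : pvLbl i ≠ "none" := by
          interval_cases i <;> first | exact absurd rfl hz | decide
        rw [Bool.eq_iff_iff]
        simp only [Bool.and_eq_true, decide_eq_true_eq, pv_hit_iff, pv_mem_act]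
        constructor
        · rintro ⟨_, h | h⟩
          · exact Or.inl ⟨h, hne⟩
          · exact Or.inr h
        · rintro (⟨h, _⟩ | h)
          · exact ⟨hz, Or.inl h⟩
          · exact ⟨hz, Or.inr h⟩
    have hout : pvOut edits na =
        ((List.range 6).filter (fun i => decide (pvLbl i ∈ pvAct edits na))).map
          (fun i => Int.ofNat i) := by
      unfold pvOut
      rw [pv_enum_eq (pvHit edits na)]
      congr 1
      exact List.filter_congr hcongr
    have hsort := pv_sortA (pvAct edits na) hnd
    have hbranch : (!(pvOut edits na).isEmpty || na.any (fun a => a != "none")) = true := by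
      obtain ⟨a, ha⟩ := List.exists_mem_of_ne_nil _ h0
      rcases (pv_mem_act edits na a).mp ha with ⟨hmem, hne⟩ | ⟨e, he, hm⟩
      · rw [Bool.or_eq_true]
        exact Or.inr (List.any_eq_true.mpr ⟨a, hmem, by simpa using hne⟩)
      · obtain ⟨hlbls, hnone⟩ := pv_vals_mem _ a hm
        obtain ⟨i, hi6, _, hlbl⟩ := pv_lbl_of_mem a hlbls hnone
        have : Int.ofNat i ∈ pvOut edits na := by
          rw [hout]
          exact List.mem_map.mpr ⟨i, List.mem_filter.mpr
            ⟨List.mem_range.mpr hi6, by simp [hlbl, ha]⟩, rfl⟩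
        rw [Bool.or_eq_true]
        exact Or.inl (by simpa using List.ne_nil_of_mem this)
    rw [if_pos hbranch, hsort, hout]

-- ===== VERDICT (by name: the statement is the Claim_ definition above) =====
theorem infer_attack_labels_spec : Claim_equal_infer_attack_labels := by
  intro edits na _
  unfold Spec_infer_attack_labels
  exact pv_main edits na
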